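-- pv_equiv track=rewrite | github.com/src-migration-tests/generic | practice-06/examples.py | count_divisible
-- ===== SOURCE A (Python) =====
-- def count_divisible(a: int, b: int, c: int):
--     count = 0
--     for x in range(a, b):
--         if x % c == 0:
--             count += 1
--     if count % 2 == 0:
--         return 'EVEN'
--     else:
--         return 'ODD'
-- ===== SOURCE B (Python) =====
-- def count_divisible(a: int, b: int, c: int):
--     if a >= b:
--         return 'EVEN'
--     cnt = (b - 1) // abs(c) - (a - 1) // abs(c)
--     return 'EVEN' if cnt % 2 == 0 else 'ODD'
-- ===== Notes on version B (the rewrite author's own statement) =====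
-- stated objective: faster
-- what changed: Replaces the O(b-a) loop over range(a,b) by the closed-form count (b-1)//|c| - (a-1)//|c| of multiples, then takes its parity.
import Mathlib
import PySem

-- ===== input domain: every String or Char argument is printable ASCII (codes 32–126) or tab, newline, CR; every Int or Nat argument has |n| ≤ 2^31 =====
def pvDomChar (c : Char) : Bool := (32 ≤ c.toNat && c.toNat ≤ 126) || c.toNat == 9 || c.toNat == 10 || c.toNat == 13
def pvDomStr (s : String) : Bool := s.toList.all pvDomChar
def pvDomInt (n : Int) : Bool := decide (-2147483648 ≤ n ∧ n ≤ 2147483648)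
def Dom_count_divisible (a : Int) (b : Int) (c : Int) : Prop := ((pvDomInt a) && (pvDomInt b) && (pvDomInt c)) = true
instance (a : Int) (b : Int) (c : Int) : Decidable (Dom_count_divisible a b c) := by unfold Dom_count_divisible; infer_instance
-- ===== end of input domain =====

-- B replaces A's O(b-a) counting loop by the closed-form multiple count (b-1)//|c| - (a-1)//|c|, then takes its parity (faster, O(1)).

-- ===== PORT A =====
def count_divisible (a : Int) (b : Int) (c : Int) : String :=
  let count : Int :=
    (PySem.List.pyRange a b 1).foldl
      (fun count x => if PySem.Int.mod x c == 0 then count + 1 else count) 0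
  if PySem.Int.mod count 2 == 0 then "EVEN" else "ODD"

-- ===== PORT B =====
def count_divisible_alt (a : Int) (b : Int) (c : Int) : String :=
  if a ≥ b then "EVEN"
  else
    let cnt : Int := PySem.Int.floordiv (b - 1) |c| - PySem.Int.floordiv (a - 1) |c|
    if PySem.Int.mod cnt 2 == 0 then "EVEN" else "ODD"

-- ===== PRECONDITION & SPEC =====
-- Pre_ excludes only c = 0 with a nonempty range, where Python A raises ZeroDivisionError (and B raises too).
def Pre_count_divisible (a : Int) (b : Int) (c : Int) : Prop := c ≠ 0 ∨ b ≤ a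
instance (a : Int) (b : Int) (c : Int) : Decidable (Pre_count_divisible a b c) := by unfold Pre_count_divisible; infer_instance
def pvWitness_count_divisible : Int × Int × Int := (1, 10, 3)

def Spec_count_divisible (a : Int) (b : Int) (c : Int) (out : String) : Prop := out = count_divisible_alt a b c
instance (a : Int) (b : Int) (c : Int) (out : String) : Decidable (Spec_count_divisible a b c out) := by unfold Spec_count_divisible; infer_instance

-- ===== CLAIM (what is proved, stated in full; the proofs are below) =====
def Claim_equal_count_divisible : Prop := ∀ (a : Int) (b : Int) (c : Int), Dom_count_divisible a b c → Pre_count_divisible a b c → Spec_count_divisible a b c (count_divisible a b c)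

-- ===== LEMMAS AND PROOFS =====

theorem fdiv_step (cc n : Int) (hcc : 0 < cc) :
    PySem.Int.floordiv n cc - PySem.Int.floordiv (n-1) cc = if cc ∣ n then 1 else 0 := by
  rw [PySem.Int.floordiv_eq_ediv_of_pos hcc, PySem.Int.floordiv_eq_ediv_of_pos hcc]
  have hr0 : 0 ≤ n % cc := Int.emod_nonneg n (by omega)
  have hr1 : n % cc < cc := Int.emod_lt_of_pos n hcc
  have hqr : n / cc * cc + n % cc = n := by rw [mul_comm]; exact Int.ediv_add_emod n cc
  by_cases hd : cc ∣ n
  · have hr : n % cc = 0 := Int.emod_eq_zero_of_dvd hd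
    have h2 : (n-1)/cc = n/cc - 1 := by
      have hx : (n/cc - 1)*cc = n/cc*cc - cc := by ring
      have h : n - 1 = (cc-1) + (n/cc - 1)*cc := by omega
      rw [h, Int.add_mul_ediv_right _ _ (by omega : cc ≠ 0),
        Int.ediv_eq_zero_of_lt (by omega) (by omega)]; ring
    simp [hd, h2]
  · have hr : n % cc ≠ 0 := fun h => hd (Int.dvd_of_emod_eq_zero h)
    have h2 : (n-1)/cc = n/cc := by
      have h : n - 1 = (n % cc - 1) + (n/cc)*cc := by omega
      rw [h, Int.add_mul_ediv_right _ _ (by omega : cc ≠ 0),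
        Int.ediv_eq_zero_of_lt (by omega) (by omega)]; ring
    simp [hd, h2]

theorem count_eq (c a b : Int) (hc : c ≠ 0) (hab : a ≤ b) :
    (PySem.List.pyRange a b 1).foldl
      (fun count x => if PySem.Int.mod x c == 0 then count + 1 else count) (0:Int)
    = PySem.Int.floordiv (b - 1) |c| - PySem.Int.floordiv (a - 1) |c| := by
  have hcc : 0 < |c| := abs_pos.mpr hc
  obtain ⟨n, rfl⟩ : ∃ n : Nat, b = a + n := ⟨(b - a).toNat, by omega⟩
  clear hab
  induction n with
  | zero =>
    simp [PySem.List.pyRange_one_eq_nil (le_refl a)]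
  | succ k ih =>
    have hk : a ≤ a + (k : Int) := by omega
    have hcast : a + ((k + 1 : Nat) : Int) = (a + (k : Int)) + 1 := by push_cast; ring
    rw [hcast, PySem.List.pyRange_one_succ_right hk, List.foldl_append, ih]
    have hstep := fdiv_step |c| (a + (k : Int)) hcc
    have he : a + (k : Int) + 1 - 1 = a + (k : Int) := by ring
    by_cases hd : |c| ∣ (a + (k : Int))
    · have hm : PySem.Int.mod (a + (k : Int)) c = 0 :=
        (PySem.Int.mod_eq_zero_iff_dvd _ _).mpr ((abs_dvd _ _).mp hd)
      rw [if_pos hd] at hstep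
      simp only [List.foldl, hm, beq_self_eq_true, if_pos]
      rw [he]; omega
    · have hm : PySem.Int.mod (a + (k : Int)) c ≠ 0 :=
        fun h => hd ((abs_dvd _ _).mpr ((PySem.Int.mod_eq_zero_iff_dvd _ _).mp h))
      rw [if_neg hd] at hstep
      simp only [List.foldl, beq_iff_eq, hm, if_false]
      rw [he]; omega

-- ===== VERDICT (by name: the statement is the Claim_ definition above) =====
theorem count_divisible_spec : Claim_equal_count_divisible := by
  intro a b c _hdom hpre
  unfold Spec_count_divisible count_divisible count_divisible_alt
  by_cases hba : b ≤ a
  · rw [PySem.List.pyRange_one_eq_nil hba]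
    simp [hba, ge_iff_le, PySem.Int.mod]
  · have hc : c ≠ 0 := hpre.resolve_right hba
    rw [count_eq c a b hc (by omega)]
    simp [ge_iff_le, hba]
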